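-- pv_equiv track=rewrite | github.com/CDMY0417/Tool_MATH | function_tools/function_total/a2rko7.py | find_repeating_remainder_cycle
-- ===== SOURCE A (Python) =====
-- def find_repeating_remainder_cycle(base: int, divisor: int) -> int:
--     seen_remainders = {}
--     current_value = base % divisor
--     cycle_length = 0
--     while current_value not in seen_remainders:
--         seen_remainders[current_value] = cycle_length
--         cycle_length += 1
--         current_value = (current_value * base) % divisor
--     return cycle_length
-- ===== SOURCE B (Python) =====
-- def find_repeating_remainder_cycle(base: int, divisor: int) -> int:
--     # Floyd tortoise-and-hare on x -> (x*base) % divisor: find a meeting point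
--     # inside the cycle, then the tail length mu and the cycle length lam;
--     # the number of distinct iterates is mu + lam.
--     x0 = base % divisor
--     tort = (x0 * base) % divisor
--     hare = (tort * base) % divisor
--     while tort != hare:
--         tort = (tort * base) % divisor
--         hare = (((hare * base) % divisor) * base) % divisor
--     mu = 0
--     tort = x0
--     while tort != hare:
--         tort = (tort * base) % divisor
--         hare = (hare * base) % divisor
--         mu += 1
--     lam = 1
--     hare = (tort * base) % divisor
--     while tort != hare:
--         hare = (hare * base) % divisor
--         lam += 1
--     return mu + lam
-- ===== Notes on version B (the rewrite author's own statement) =====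
-- stated objective: alternative
-- what changed: Replaces the dictionary-of-seen-remainders walk by Floyd's tortoise-and-hare cycle detection (find a meeting point in the cycle, then recover tail length mu and cycle length lam, returning mu+lam) in O(1) extra space.
import Mathlib
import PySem

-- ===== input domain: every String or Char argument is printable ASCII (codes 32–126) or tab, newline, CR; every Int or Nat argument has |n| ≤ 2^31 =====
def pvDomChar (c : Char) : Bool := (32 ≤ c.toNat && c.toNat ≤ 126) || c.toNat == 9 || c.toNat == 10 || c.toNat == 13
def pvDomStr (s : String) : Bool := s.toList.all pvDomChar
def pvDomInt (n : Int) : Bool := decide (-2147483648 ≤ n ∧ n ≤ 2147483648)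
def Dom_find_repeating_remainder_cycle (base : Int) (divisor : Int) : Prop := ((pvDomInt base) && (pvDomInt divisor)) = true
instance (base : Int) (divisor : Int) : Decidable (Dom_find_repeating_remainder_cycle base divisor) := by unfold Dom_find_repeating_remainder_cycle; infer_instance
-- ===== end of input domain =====

-- B replaces A's dictionary of seen remainders by Floyd's tortoise-and-hare
-- cycle detection (O(1) extra space); equal return values are proved below.

-- ===== PORT A =====
-- the while loop of A: state (seen, current_value, cycle_length); fuel |divisor|+1
-- is proved sufficient (pvALoop_eq below), so the 0-fuel branch is never reached on Pre_.
def pvALoop (base divisor : Int) : Nat → PySem.Dict Int Int → Int → Int → Int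
  | 0, _, _, cl => cl
  | fuel+1, seen, cv, cl =>
    if seen.contains cv then cl
    else pvALoop base divisor fuel (seen.insert cv cl)
      (PySem.Int.mod (cv * base) divisor) (cl + 1)

def find_repeating_remainder_cycle (base : Int) (divisor : Int) : Int :=
  pvALoop base divisor (divisor.natAbs + 1) PySem.Dict.empty (PySem.Int.mod base divisor) 0

-- ===== PORT B =====
-- Floyd phase 1: advance tortoise by one step, hare by two, until they meet; returns tort.
def pvPhase1 (base divisor : Int) : Nat → Int → Int → Int
  | 0, tort, _ => tort
  | fuel+1, tort, hare =>
    if tort = hare then tort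
    else pvPhase1 base divisor fuel (PySem.Int.mod (tort * base) divisor)
      (PySem.Int.mod (PySem.Int.mod (hare * base) divisor * base) divisor)

-- Floyd phase 2: tortoise restarts at x0; count steps (mu) until it meets the hare.
def pvPhase2 (base divisor : Int) : Nat → Int → Int → Int → Int × Int
  | 0, mu, tort, _ => (mu, tort)
  | fuel+1, mu, tort, hare =>
    if tort = hare then (mu, tort)
    else pvPhase2 base divisor fuel (mu + 1)
      (PySem.Int.mod (tort * base) divisor) (PySem.Int.mod (hare * base) divisor)

-- Floyd phase 3: walk the hare around the cycle counting its length (lam).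
def pvPhase3 (base divisor : Int) : Nat → Int → Int → Int → Int
  | 0, lam, _, _ => lam
  | fuel+1, lam, tort, hare =>
    if tort = hare then lam
    else pvPhase3 base divisor fuel (lam + 1) tort (PySem.Int.mod (hare * base) divisor)

def find_repeating_remainder_cycle_alt (base : Int) (divisor : Int) : Int :=
  let x0 := PySem.Int.mod base divisor
  let t1 := PySem.Int.mod (x0 * base) divisor
  let h1 := PySem.Int.mod (t1 * base) divisor
  let meet := pvPhase1 base divisor ((divisor.natAbs + 1) * (divisor.natAbs + 1)) t1 h1
  let p2 := pvPhase2 base divisor (divisor.natAbs + 1) 0 x0 meet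
  let lam := pvPhase3 base divisor (divisor.natAbs + 1) 1 p2.2 (PySem.Int.mod (p2.2 * base) divisor)
  p2.1 + lam

-- ===== PRECONDITION & SPEC =====
-- divisor = 0 makes A's very first '%' raise ZeroDivisionError; excluded.
def Pre_find_repeating_remainder_cycle (base : Int) (divisor : Int) : Prop := divisor ≠ 0
instance (base : Int) (divisor : Int) : Decidable (Pre_find_repeating_remainder_cycle base divisor) := by unfold Pre_find_repeating_remainder_cycle; infer_instance

def pvWitness_find_repeating_remainder_cycle : Int × Int := (3, 7)

def Spec_find_repeating_remainder_cycle (base : Int) (divisor : Int) (out : Int) : Prop := out = find_repeating_remainder_cycle_alt base divisor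
instance (base : Int) (divisor : Int) (out : Int) : Decidable (Spec_find_repeating_remainder_cycle base divisor out) := by unfold Spec_find_repeating_remainder_cycle; infer_instance

-- ===== CLAIM (what is proved, stated in full; the proofs are below) =====
def Claim_equal_find_repeating_remainder_cycle : Prop := ∀ (base : Int) (divisor : Int), Dom_find_repeating_remainder_cycle base divisor → Pre_find_repeating_remainder_cycle base divisor → Spec_find_repeating_remainder_cycle base divisor (find_repeating_remainder_cycle base divisor)

-- ===== LEMMAS AND PROOFS =====

-- the orbit x0, f(x0), f(f(x0)), … of x0 = base % divisor under f(x) = (x*base) % divisor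
def pvOrb (base divisor : Int) : Nat → Int
  | 0 => PySem.Int.mod base divisor
  | n+1 => PySem.Int.mod (pvOrb base divisor n * base) divisor

-- A's dictionary after k iterations: keys orb 0 … orb (k-1), values their indices
def pvDictOf (base d : Int) : Nat → PySem.Dict Int Int
  | 0 => PySem.Dict.empty
  | k+1 => (pvDictOf base d k).insert (pvOrb base d k) (k : Int)

lemma pvMod_natAbs_lt (a d : Int) (hd : d ≠ 0) : (PySem.Int.mod a d).natAbs < d.natAbs := by
  rcases lt_or_gt_of_ne hd with h | h
  · have := PySem.Int.mod_neg_bounds a h; omega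
  · have h1 := PySem.Int.mod_nonneg a h
    have h2 := PySem.Int.mod_lt a h
    omega

lemma pvMod_eq_of_natAbs_eq (a b d : Int) (hd : d ≠ 0)
    (h : (PySem.Int.mod a d).natAbs = (PySem.Int.mod b d).natAbs) :
    PySem.Int.mod a d = PySem.Int.mod b d := by
  rcases lt_or_gt_of_ne hd with hneg | hpos
  · have h1 := PySem.Int.mod_neg_bounds a hneg
    have h2 := PySem.Int.mod_neg_bounds b hneg
    omega
  · have h1 := PySem.Int.mod_nonneg a hpos
    have h2 := PySem.Int.mod_nonneg b hpos
    omega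

lemma pvOrb_is_mod (base d : Int) (n : Nat) : ∃ a, pvOrb base d n = PySem.Int.mod a d := by
  cases n with
  | zero => exact ⟨base, rfl⟩
  | succ m => exact ⟨pvOrb base d m * base, rfl⟩

lemma pvOrb_natAbs_lt (base d : Int) (hd : d ≠ 0) (n : Nat) :
    (pvOrb base d n).natAbs < d.natAbs := by
  obtain ⟨a, ha⟩ := pvOrb_is_mod base d n
  rw [ha]; exact pvMod_natAbs_lt a d hd

lemma pvOrb_eq_of_natAbs_eq (base d : Int) (hd : d ≠ 0) (i j : Nat)
    (h : (pvOrb base d i).natAbs = (pvOrb base d j).natAbs) :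
    pvOrb base d i = pvOrb base d j := by
  obtain ⟨a, ha⟩ := pvOrb_is_mod base d i
  obtain ⟨b, hb⟩ := pvOrb_is_mod base d j
  rw [ha, hb] at h ⊢
  exact pvMod_eq_of_natAbs_eq a b d hd h

lemma pvRepeat_exists (base d : Int) (hd : d ≠ 0) :
    ∃ n, n ≤ d.natAbs ∧ ∃ m < n, pvOrb base d m = pvOrb base d n := by
  have hcard : Fintype.card (Fin d.natAbs) < Fintype.card (Fin (d.natAbs + 1)) := by simp
  obtain ⟨i, j, hne, heq⟩ := Fintype.exists_ne_map_eq_of_card_lt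
    (fun k : Fin (d.natAbs + 1) => (⟨(pvOrb base d k).natAbs, pvOrb_natAbs_lt base d hd k⟩ : Fin d.natAbs)) hcard
  have habs : (pvOrb base d i).natAbs = (pvOrb base d j).natAbs := by
    simpa using congrArg Fin.val heq
  have horb := pvOrb_eq_of_natAbs_eq base d hd i j habs
  rcases Nat.lt_or_ge i.val j.val with h | h
  · exact ⟨j, Nat.lt_succ_iff.mp j.isLt, i, h, horb⟩
  · have h' : j.val < i.val := lt_of_le_of_ne h (by
      intro he; exact hne (Fin.ext he.symm))
    exact ⟨i, Nat.lt_succ_iff.mp i.isLt, j, h', horb.symm⟩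

lemma pvOrb_step (base d : Int) {a b : Nat} (h : pvOrb base d a = pvOrb base d b) :
    pvOrb base d (a+1) = pvOrb base d (b+1) := by
  show PySem.Int.mod (pvOrb base d a * base) d = PySem.Int.mod (pvOrb base d b * base) d
  rw [h]

lemma pvOrb_period (base d : Int) (mu lam : Nat)
    (hcyc : pvOrb base d (mu + lam) = pvOrb base d mu) :
    ∀ t i, mu ≤ i → pvOrb base d (i + t * lam) = pvOrb base d i := by
  have hshift : ∀ j, pvOrb base d (mu + lam + j) = pvOrb base d (mu + j) := by
    intro j; induction j with
    | zero => simpa using hcyc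
    | succ k ih => exact pvOrb_step base d ih
  have hsingle : ∀ i, mu ≤ i → pvOrb base d (i + lam) = pvOrb base d i := by
    intro i hi
    obtain ⟨j, rfl⟩ := Nat.exists_eq_add_of_le hi
    have h1 : mu + j + lam = mu + lam + j := by omega
    rw [h1]; exact hshift j
  intro t
  induction t with
  | zero => intro i hi; simp
  | succ k ih =>
    intro i hi
    have h1 : i + (k+1) * lam = (i + k * lam) + lam := by ring
    rw [h1, hsingle (i + k * lam) (le_trans hi (Nat.le_add_right _ _)), ih i hi]

lemma pvOrb_tail_cycle (base d : Int) (mu lam : Nat) (hlam : 0 < lam)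
    (hinj : ∀ i j, i < mu + lam → j < mu + lam → pvOrb base d i = pvOrb base d j → i = j)
    (hcyc : pvOrb base d (mu + lam) = pvOrb base d mu)
    (a b : Nat) (hab : a < b) (h : pvOrb base d a = pvOrb base d b) :
    mu ≤ a ∧ lam ∣ (b - a) := by
  have hper := pvOrb_period base d mu lam hcyc
  have hcanon : ∀ i, mu ≤ i → pvOrb base d i = pvOrb base d (mu + (i - mu) % lam) := by
    intro i hi
    have hdm := Nat.div_add_mod (i - mu) lam
    have hmc : ((i - mu) / lam) * lam = lam * ((i - mu) / lam) := Nat.mul_comm _ _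
    have hdecomp : i = (mu + (i - mu) % lam) + ((i - mu) / lam) * lam := by omega
    calc pvOrb base d i
        = pvOrb base d ((mu + (i - mu) % lam) + ((i - mu) / lam) * lam) := by rw [← hdecomp]
      _ = pvOrb base d (mu + (i - mu) % lam) := hper _ _ (Nat.le_add_right _ _)
  have hcanLt : ∀ i, (if i < mu then i else mu + (i - mu) % lam) < mu + lam := by
    intro i; split
    · omega
    · have := Nat.mod_lt (i - mu) hlam; omega
  have hcanEq : ∀ i, pvOrb base d (if i < mu then i else mu + (i - mu) % lam) = pvOrb base d i := by
    intro i; split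
    · rfl
    · next h' => exact (hcanon i (Nat.le_of_not_lt h')).symm
  have hkey : (if a < mu then a else mu + (a - mu) % lam)
      = (if b < mu then b else mu + (b - mu) % lam) :=
    hinj _ _ (hcanLt a) (hcanLt b) (by rw [hcanEq a, hcanEq b, h])
  have hmua : mu ≤ a := by
    by_contra hca
    have hca' : a < mu := Nat.lt_of_not_le hca
    by_cases hcb : b < mu
    · simp [hca', hcb] at hkey; omega
    · simp [hca', hcb] at hkey
      have := Nat.mod_lt (b - mu) hlam
      omega
  have hmub : mu ≤ b := le_trans hmua (Nat.le_of_lt hab)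
  refine ⟨hmua, ?_⟩
  have hka : ¬ a < mu := by omega
  have hkb : ¬ b < mu := by omega
  simp [hka, hkb] at hkey
  have h1 := Nat.div_add_mod (a - mu) lam
  have h2 := Nat.div_add_mod (b - mu) lam
  have hmle : lam * ((a - mu) / lam) ≤ lam * ((b - mu) / lam) := by omega
  have hq : (a - mu) / lam ≤ (b - mu) / lam := Nat.le_of_mul_le_mul_left hmle hlam
  refine ⟨(b - mu) / lam - (a - mu) / lam, ?_⟩
  rw [Nat.mul_sub]
  omega

lemma pvDictOf_contains (base d : Int) (k : Nat) (x : Int) :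
    (pvDictOf base d k).contains x = true ↔ ∃ i < k, pvOrb base d i = x := by
  induction k with
  | zero => simp [pvDictOf, PySem.Dict.contains_empty]
  | succ n ih =>
    rw [pvDictOf, PySem.Dict.contains_insert]
    simp only [Bool.or_eq_true, beq_iff_eq, ih]
    constructor
    · rintro (h | ⟨i, hi, hoi⟩)
      · exact ⟨n, Nat.lt_succ_self n, h.symm⟩
      · exact ⟨i, Nat.lt_succ_of_lt hi, hoi⟩
    · rintro ⟨i, hi, hoi⟩
      rcases Nat.lt_succ_iff_lt_or_eq.mp hi with h | rfl
      · exact Or.inr ⟨i, h, hoi⟩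
      · exact Or.inl hoi.symm

lemma pvALoop_eq (base d : Int) (N : Nat)
    (hN1 : ∀ j < N, ¬ ∃ m < j, pvOrb base d m = pvOrb base d j)
    (hN2 : ∃ m < N, pvOrb base d m = pvOrb base d N) :
    ∀ fuel k, k ≤ N → N - k < fuel →
      pvALoop base d fuel (pvDictOf base d k) (pvOrb base d k) (k : Int) = (N : Int) := by
  intro fuel
  induction fuel with
  | zero => intro k hk hf; omega
  | succ f ih =>
    intro k hk hf
    rw [pvALoop]
    by_cases hmem : ∃ i < k, pvOrb base d i = pvOrb base d k
    · have hco : (pvDictOf base d k).contains (pvOrb base d k) = true :=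
        (pvDictOf_contains base d k _).mpr hmem
      have hkN : k = N := by
        rcases Nat.lt_or_ge k N with h | h
        · exact absurd hmem (hN1 k h)
        · omega
      subst hkN; rw [hco]; simp
    · have hco : (pvDictOf base d k).contains (pvOrb base d k) = false :=
        Bool.eq_false_iff.mpr (fun h => hmem ((pvDictOf_contains base d k _).mp h))
      have hkN : k < N := by
        rcases Nat.lt_or_ge k N with h | h
        · exact h
        · exfalso; have : k = N := by omega
          subst this; exact hmem hN2
      rw [hco]
      simp only [Bool.false_eq_true, if_false]
      have hcast : (k : Int) + 1 = ((k + 1 : Nat) : Int) := by push_cast; ring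
      rw [hcast,
        show (pvDictOf base d k).insert (pvOrb base d k) (k : Int) = pvDictOf base d (k+1) from rfl,
        show PySem.Int.mod (pvOrb base d k * base) d = pvOrb base d (k+1) from rfl]
      exact ih (k+1) hkN (by omega)

lemma pvPhase1_eq (base d : Int) (M : Nat)
    (hM1 : ∀ j, 1 ≤ j → j < M → pvOrb base d j ≠ pvOrb base d (2*j))
    (hM2 : pvOrb base d M = pvOrb base d (2*M)) :
    ∀ fuel i, 1 ≤ i → i ≤ M → M - i < fuel →
      pvPhase1 base d fuel (pvOrb base d i) (pvOrb base d (2*i)) = pvOrb base d M := by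
  intro fuel
  induction fuel with
  | zero => intro i h1 h2 h3; omega
  | succ f ih =>
    intro i h1 h2 h3
    rw [pvPhase1]
    by_cases he : pvOrb base d i = pvOrb base d (2*i)
    · have hiM : i = M := by
        rcases Nat.lt_or_ge i M with h | h
        · exact absurd he (hM1 i h1 h)
        · omega
      subst hiM
      simp [he]
    · have hiM : i < M := by
        rcases Nat.lt_or_ge i M with h | h
        · exact h
        · exfalso; have : i = M := by omega
          subst this; exact he hM2
      rw [if_neg he]
      have e1 : PySem.Int.mod (pvOrb base d i * base) d = pvOrb base d (i+1) := rfl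
      have e2 : PySem.Int.mod (PySem.Int.mod (pvOrb base d (2*i) * base) d * base) d
          = pvOrb base d (2*(i+1)) := by
        have h21 : 2*(i+1) = (2*i+1)+1 := by ring
        rw [h21]
        rfl
      rw [e1, e2]
      exact ih (i+1) (by omega) hiM (by omega)

lemma pvPhase2_eq (base d : Int) (mu lam M : Nat) (hlam : 0 < lam)
    (hinj : ∀ i j, i < mu + lam → j < mu + lam → pvOrb base d i = pvOrb base d j → i = j)
    (hcyc : pvOrb base d (mu + lam) = pvOrb base d mu)
    (hM0 : 1 ≤ M) (hmuM : mu ≤ M) (hdvd : lam ∣ M) :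
    ∀ fuel j, j ≤ mu → mu - j < fuel →
      pvPhase2 base d fuel (j : Int) (pvOrb base d j) (pvOrb base d (M + j))
        = ((mu : Int), pvOrb base d mu) := by
  intro fuel
  induction fuel with
  | zero => intro j h1 h2; omega
  | succ f ih =>
    intro j h1 h2
    rw [pvPhase2]
    by_cases he : pvOrb base d j = pvOrb base d (M + j)
    · have hjmu : j = mu := by
        rcases Nat.lt_or_ge j mu with h | h
        · exfalso
          have := (pvOrb_tail_cycle base d mu lam hlam hinj hcyc j (M + j) (by omega) he).1
          omega
        · omega
      subst hjmu
      rw [if_pos he]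
    · have hjmu : j < mu := by
        rcases Nat.lt_or_ge j mu with h | h
        · exact h
        · exfalso
          have hj : j = mu := by omega
          subst hj
          obtain ⟨t, rfl⟩ := hdvd
          have hMj : lam * t + j = j + t * lam := by ring
          apply he
          rw [hMj]
          exact (pvOrb_period base d j lam hcyc t j (le_refl j)).symm
      rw [if_neg he]
      have e1 : PySem.Int.mod (pvOrb base d j * base) d = pvOrb base d (j+1) := rfl
      have e2 : PySem.Int.mod (pvOrb base d (M + j) * base) d = pvOrb base d (M + (j+1)) := rfl
      have hcast : (j : Int) + 1 = ((j + 1 : Nat) : Int) := by push_cast; ring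
      rw [e1, e2, hcast]
      exact ih (j+1) hjmu (by omega)

lemma pvPhase3_eq (base d : Int) (mu lam : Nat) (hlam : 0 < lam)
    (hinj : ∀ i j, i < mu + lam → j < mu + lam → pvOrb base d i = pvOrb base d j → i = j)
    (hcyc : pvOrb base d (mu + lam) = pvOrb base d mu) :
    ∀ fuel p, 1 ≤ p → p ≤ lam → lam - p < fuel →
      pvPhase3 base d fuel (p : Int) (pvOrb base d mu) (pvOrb base d (mu + p)) = (lam : Int) := by
  intro fuel
  induction fuel with
  | zero => intro p h1 h2 h3; omega
  | succ f ih =>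
    intro p h1 h2 h3
    rw [pvPhase3]
    by_cases he : pvOrb base d mu = pvOrb base d (mu + p)
    · have hp : p = lam := by
        rcases Nat.lt_or_ge p lam with h | h
        · exfalso
          have hdvd := (pvOrb_tail_cycle base d mu lam hlam hinj hcyc mu (mu + p) (by omega) he).2
          have : lam ∣ p := by simpa using hdvd
          have := Nat.le_of_dvd (by omega) this
          omega
        · omega
      subst hp
      rw [if_pos he]
    · have hp : p < lam := by
        rcases Nat.lt_or_ge p lam with h | h
        · exact h
        · exfalso
          have : p = lam := by omega
          subst this
          exact he hcyc.symm
      rw [if_neg he]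
      have e1 : PySem.Int.mod (pvOrb base d (mu + p) * base) d = pvOrb base d (mu + (p+1)) := rfl
      have hcast : (p : Int) + 1 = ((p + 1 : Nat) : Int) := by push_cast; ring
      rw [e1, hcast]
      exact ih (p+1) (by omega) hp (by omega)

theorem pvMain (base d : Int) (hd : d ≠ 0) :
    find_repeating_remainder_cycle base d = find_repeating_remainder_cycle_alt base d := by
  classical
  obtain ⟨n0, hn0le, hn0P⟩ := pvRepeat_exists base d hd
  have hex : ∃ n, ∃ m < n, pvOrb base d m = pvOrb base d n := ⟨n0, hn0P⟩
  set N := Nat.find hex with hNdef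
  have hN2 : ∃ m < N, pvOrb base d m = pvOrb base d N := Nat.find_spec hex
  have hN1 : ∀ j < N, ¬ ∃ m < j, pvOrb base d m = pvOrb base d j :=
    fun j hj => Nat.find_min hex hj
  have hNle : N ≤ d.natAbs := le_trans (Nat.find_min' hex hn0P) hn0le
  obtain ⟨mu, hmuN, hmueq⟩ := hN2
  have hN2' : ∃ m < N, pvOrb base d m = pvOrb base d N := ⟨mu, hmuN, hmueq⟩
  set lam := N - mu with hlamdef
  have hlam : 0 < lam := by omega
  have hNsum : mu + lam = N := by omega
  have hcyc : pvOrb base d (mu + lam) = pvOrb base d mu := by rw [hNsum]; exact hmueq.symm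
  have hinj : ∀ i j, i < mu + lam → j < mu + lam → pvOrb base d i = pvOrb base d j → i = j := by
    intro i j hi hj hij
    rw [hNsum] at hi hj
    rcases Nat.lt_trichotomy i j with h | h | h
    · exact absurd ⟨i, h, hij⟩ (hN1 j hj)
    · exact h
    · exact absurd ⟨j, h, hij.symm⟩ (hN1 i hi)
  -- A returns N
  have hA : find_repeating_remainder_cycle base d = (N : Int) := by
    have h := pvALoop_eq base d N hN1 hN2' (d.natAbs + 1) 0 (Nat.zero_le N) (by omega)
    exact h
  -- meeting point M for Floyd phase 1
  have hper := pvOrb_period base d mu lam hcyc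
  have hm0 : 1 ≤ lam * (mu + 1) := Nat.one_le_iff_ne_zero.mpr (by positivity)
  have hm0meet : pvOrb base d (lam * (mu + 1)) = pvOrb base d (2 * (lam * (mu + 1))) := by
    have h1 : 2 * (lam * (mu + 1)) = lam * (mu + 1) + (mu + 1) * lam := by ring
    rw [h1]
    exact (hper (mu + 1) (lam * (mu + 1)) (by nlinarith)).symm
  have hexQ : ∃ m, 1 ≤ m ∧ pvOrb base d m = pvOrb base d (2 * m) := ⟨lam * (mu + 1), hm0, hm0meet⟩
  set M := Nat.find hexQ with hMdef
  have hMspec := Nat.find_spec hexQ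
  have hM0 : 1 ≤ M := hMspec.1
  have hM2 : pvOrb base d M = pvOrb base d (2 * M) := hMspec.2
  have hM1 : ∀ j, 1 ≤ j → j < M → pvOrb base d j ≠ pvOrb base d (2 * j) :=
    fun j h1 hj h2 => Nat.find_min hexQ hj ⟨h1, h2⟩
  have hMle : M ≤ d.natAbs * d.natAbs := by
    have h1 : M ≤ lam * (mu + 1) := Nat.find_min' hexQ ⟨hm0, hm0meet⟩
    have h2 : lam ≤ d.natAbs := by omega
    have h3 : mu + 1 ≤ d.natAbs := by omega
    calc M ≤ lam * (mu + 1) := h1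
      _ ≤ d.natAbs * d.natAbs := Nat.mul_le_mul h2 h3
  have hmeet0 := pvOrb_tail_cycle base d mu lam hlam hinj hcyc M (2 * M) (by omega) hM2
  have hmuM : mu ≤ M := hmeet0.1
  have hdvd : lam ∣ M := by
    have := hmeet0.2
    have h2 : 2 * M - M = M := by omega
    rwa [h2] at this
  -- the three Floyd phases
  have hsq : (d.natAbs + 1) * (d.natAbs + 1) = d.natAbs * d.natAbs + 2 * d.natAbs + 1 := by ring
  have hmeet : pvPhase1 base d ((d.natAbs + 1) * (d.natAbs + 1))
      (PySem.Int.mod (PySem.Int.mod base d * base) d)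
      (PySem.Int.mod (PySem.Int.mod (PySem.Int.mod base d * base) d * base) d)
      = pvOrb base d M := by
    have h := pvPhase1_eq base d M hM1 hM2 ((d.natAbs + 1) * (d.natAbs + 1)) 1
      (le_refl 1) hM0 (by omega)
    exact h
  have hp2 : pvPhase2 base d (d.natAbs + 1) 0 (PySem.Int.mod base d) (pvOrb base d M)
      = ((mu : Int), pvOrb base d mu) := by
    have h := pvPhase2_eq base d mu lam M hlam hinj hcyc hM0 hmuM hdvd (d.natAbs + 1) 0
      (Nat.zero_le mu) (by omega)
    exact h
  have hp3 : pvPhase3 base d (d.natAbs + 1) 1 (pvOrb base d mu)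
      (PySem.Int.mod (pvOrb base d mu * base) d) = (lam : Int) := by
    have h := pvPhase3_eq base d mu lam hlam hinj hcyc (d.natAbs + 1) 1
      (le_refl 1) hlam (by omega)
    exact h
  have hB : find_repeating_remainder_cycle_alt base d = (mu : Int) + (lam : Int) := by
    show (pvPhase2 base d (d.natAbs + 1) 0 (PySem.Int.mod base d)
        (pvPhase1 base d ((d.natAbs + 1) * (d.natAbs + 1))
          (PySem.Int.mod (PySem.Int.mod base d * base) d)
          (PySem.Int.mod (PySem.Int.mod (PySem.Int.mod base d * base) d * base) d))).1
      + pvPhase3 base d (d.natAbs + 1) 1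
          (pvPhase2 base d (d.natAbs + 1) 0 (PySem.Int.mod base d)
            (pvPhase1 base d ((d.natAbs + 1) * (d.natAbs + 1))
              (PySem.Int.mod (PySem.Int.mod base d * base) d)
              (PySem.Int.mod (PySem.Int.mod (PySem.Int.mod base d * base) d * base) d))).2
          (PySem.Int.mod ((pvPhase2 base d (d.natAbs + 1) 0 (PySem.Int.mod base d)
            (pvPhase1 base d ((d.natAbs + 1) * (d.natAbs + 1))
              (PySem.Int.mod (PySem.Int.mod base d * base) d)
              (PySem.Int.mod (PySem.Int.mod (PySem.Int.mod base d * base) d * base) d))).2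
            * base) d) = (mu : Int) + (lam : Int)
    rw [hmeet, hp2, hp3]
  rw [hA, hB, ← hNsum]
  push_cast
  ring

-- ===== VERDICT (by name: the statement is the Claim_ definition above) =====
theorem find_repeating_remainder_cycle_spec : Claim_equal_find_repeating_remainder_cycle := by
  intro base divisor _hdom hpre
  unfold Spec_find_repeating_remainder_cycle
  exact pvMain base divisor hpre
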